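-- pv_equiv track=rewrite | github.com/agus-gabrielli/algoritmosI | TP1/Viejos Archivos/snake.py | partida_perdida
-- ===== SOURCE A (Python) =====
-- FILAS_TABLERO = 35
--
-- COLUMNAS_TABLERO = 70
--
-- def partida_perdida(posicion_serpiente, movimiento, nueva_posicion_cabeza):
-- 	"""Devuelve True si la serpiente choca con los bordes del mapa o si se come a si misma, es decir,
-- 	devuelve True si perdio el jugador."""
-- 	en_primera_fila = posicion_serpiente[0] in [[0,i] for i in range(COLUMNAS_TABLERO)]
-- 	en_ultima_fila = posicion_serpiente[0] in [[FILAS_TABLERO-1,i] for i in range(FILAS_TABLERO)]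
-- 	en_primera_columna = posicion_serpiente[0] in [[i,0] for i in range(FILAS_TABLERO)]
-- 	en_ultima_columna = posicion_serpiente[0] in [[i,COLUMNAS_TABLERO-1] for i in range(FILAS_TABLERO)]
--
-- 	return any((en_primera_fila and movimiento == "w", en_ultima_fila and movimiento == "s",
-- 	en_primera_columna and movimiento == "a", en_ultima_columna and movimiento == "d",
-- 	nueva_posicion_cabeza in posicion_serpiente[:-1] and len(posicion_serpiente) > 2,
-- 	nueva_posicion_cabeza in posicion_serpiente and len(posicion_serpiente) == 2))
-- ===== SOURCE B (Python) =====
-- FILAS_TABLERO = 35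
--
-- COLUMNAS_TABLERO = 70
--
-- def partida_perdida(posicion_serpiente, movimiento, nueva_posicion_cabeza):
-- 	"""Devuelve True si la serpiente choca contra un borde del mapa o contra su propio cuerpo."""
-- 	match movimiento, posicion_serpiente[0]:
-- 		case ("w", [fila, columna]) if fila == 0 and 0 <= columna < COLUMNAS_TABLERO:
-- 			return True
-- 		case ("s", [fila, columna]) if fila == FILAS_TABLERO - 1 and 0 <= columna < COLUMNAS_TABLERO:
-- 			return True
-- 		case ("a", [fila, columna]) if columna == 0 and 0 <= fila < FILAS_TABLERO:
-- 			return True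
-- 		case ("d", [fila, columna]) if columna == COLUMNAS_TABLERO - 1 and 0 <= fila < FILAS_TABLERO:
-- 			return True
-- 	cuerpo = posicion_serpiente if len(posicion_serpiente) == 2 else posicion_serpiente[:-1]
-- 	return nueva_posicion_cabeza in cuerpo
-- ===== Notes on version B (the rewrite author's own statement) =====
-- stated objective: simpler
-- what changed: B replaces A's four generated border-cell lists and membership scans with a match/case on the movement and the head's [fila, columna] pattern comparing the coordinates to the walls directly, and selects the body to test for self-collision once instead of two length-gated membership disjuncts; Pre_ excludes only the empty snake, on which A raises IndexError.
-- intended difference: When the movement is 's' and the head is a bottom-row cell [34, c] with 35 <= c < 70 and no self-collision fires, A returns False (its bottom row was generated with range(FILAS_TABLERO), covering only columns 0-34) while B returns True, the intended value since the head is on the bottom wall. — e.g. on partida_perdida([[34, 40], [33, 40]], "s", [0, 0]): A returns false, B returns true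
import Mathlib
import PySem

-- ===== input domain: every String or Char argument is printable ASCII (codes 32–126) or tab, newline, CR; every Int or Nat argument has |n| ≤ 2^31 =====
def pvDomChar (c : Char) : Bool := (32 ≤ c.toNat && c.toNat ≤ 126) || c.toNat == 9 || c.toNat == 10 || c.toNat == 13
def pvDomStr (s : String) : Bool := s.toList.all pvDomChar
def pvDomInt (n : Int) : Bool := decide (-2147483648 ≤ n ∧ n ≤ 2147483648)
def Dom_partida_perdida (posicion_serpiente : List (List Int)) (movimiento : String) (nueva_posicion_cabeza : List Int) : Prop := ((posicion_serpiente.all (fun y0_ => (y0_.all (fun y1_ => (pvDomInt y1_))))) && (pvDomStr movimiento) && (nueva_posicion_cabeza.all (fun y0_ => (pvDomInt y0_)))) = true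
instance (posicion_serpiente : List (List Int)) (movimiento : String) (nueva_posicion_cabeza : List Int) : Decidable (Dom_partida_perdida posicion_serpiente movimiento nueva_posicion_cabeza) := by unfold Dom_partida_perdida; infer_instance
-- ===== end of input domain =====

-- B replaces the four generated border lists and membership scans by a match/case on the
-- movement and the head's coordinates (objective: simpler); B fixes A's bottom-row wall
-- check, which A only performs for columns 0–34 (see D_ below).

-- ===== PORT A =====
-- literal transliteration: builds the four boundary lists and tests membership, then any(...)
def partida_perdida (posicion_serpiente : List (List Int)) (movimiento : String) (nueva_posicion_cabeza : List Int) : Bool :=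
  match PySem.List.pyGet? posicion_serpiente 0 with
  | none => false  -- IndexError in Python; excluded by Pre_
  | some cabeza =>
    let en_primera_fila := ((PySem.List.pyRange 0 70 1).map (fun i => [0, i])).contains cabeza
    let en_ultima_fila := ((PySem.List.pyRange 0 35 1).map (fun i => [34, i])).contains cabeza
    let en_primera_columna := ((PySem.List.pyRange 0 35 1).map (fun i => [i, 0])).contains cabeza
    let en_ultima_columna := ((PySem.List.pyRange 0 35 1).map (fun i => [i, 69])).contains cabeza
    (en_primera_fila && movimiento == "w") ||
    (en_ultima_fila && movimiento == "s") ||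
    (en_primera_columna && movimiento == "a") ||
    (en_ultima_columna && movimiento == "d") ||
    ((PySem.List.slice posicion_serpiente none (some (-1))).contains nueva_posicion_cabeza
        && decide (posicion_serpiente.length > 2)) ||
    (posicion_serpiente.contains nueva_posicion_cabeza && decide (posicion_serpiente.length = 2))

-- ===== PORT B =====
-- literal transliteration of Source B: the match/case arms (a [fila, columna] pattern with its
-- guard, tried in order; each case returns True) become the guarded chain below, and the
-- fall-through is the cuerpo membership test
def partida_perdida_alt (posicion_serpiente : List (List Int)) (movimiento : String) (nueva_posicion_cabeza : List Int) : Bool :=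
  match PySem.List.pyGet? posicion_serpiente 0 with
  | none => false  -- IndexError in Python; excluded by Pre_
  | some cabeza =>
    let cuerpo := if posicion_serpiente.length = 2 then posicion_serpiente
                  else PySem.List.slice posicion_serpiente none (some (-1))
    match cabeza with
    | [fila, columna] =>
      if movimiento == "w" && fila == 0 && decide (0 ≤ columna) && decide (columna < 70) then true
      else if movimiento == "s" && fila == 35 - 1 && decide (0 ≤ columna) && decide (columna < 70) then true
      else if movimiento == "a" && columna == 0 && decide (0 ≤ fila) && decide (fila < 35) then true
      else if movimiento == "d" && columna == 70 - 1 && decide (0 ≤ fila) && decide (fila < 35) then true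
      else cuerpo.contains nueva_posicion_cabeza
    | _ => cuerpo.contains nueva_posicion_cabeza  -- no [fila, columna] pattern matches

-- ===== PRECONDITION & SPEC =====
-- Pre_ excludes only the empty snake, on which Python A raises IndexError at posicion_serpiente[0].
def Pre_partida_perdida (posicion_serpiente : List (List Int)) (movimiento : String) (nueva_posicion_cabeza : List Int) : Prop := posicion_serpiente ≠ []
instance (posicion_serpiente : List (List Int)) (movimiento : String) (nueva_posicion_cabeza : List Int) : Decidable (Pre_partida_perdida posicion_serpiente movimiento nueva_posicion_cabeza) := by unfold Pre_partida_perdida; infer_instance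
def pvWitness_partida_perdida : List (List Int) × String × List Int := ([[0, 3], [1, 3]], "w", [0, 3])

-- D_: moving "s" with the head on the bottom row at a column in 35–69 and no self-collision:
-- A returns False (it generated the bottom row with range(FILAS_TABLERO), so it only covers
-- columns 0–34), B returns True — the intended value, since the head is on the bottom wall.
def pvCol (ps : List (List Int)) : Int := (ps.headD []).getD 1 0
def D_partida_perdida (posicion_serpiente : List (List Int)) (movimiento : String) (nueva_posicion_cabeza : List Int) : Prop :=
  movimiento = "s" ∧ posicion_serpiente.headD [] = [34, pvCol posicion_serpiente] ∧
  35 ≤ pvCol posicion_serpiente ∧ pvCol posicion_serpiente < 70 ∧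
  ¬(nueva_posicion_cabeza ∈ posicion_serpiente.dropLast ∨
    (nueva_posicion_cabeza ∈ posicion_serpiente ∧ posicion_serpiente.length = 2))
instance (posicion_serpiente : List (List Int)) (movimiento : String) (nueva_posicion_cabeza : List Int) : Decidable (D_partida_perdida posicion_serpiente movimiento nueva_posicion_cabeza) := by unfold D_partida_perdida; infer_instance

def Spec_partida_perdida (posicion_serpiente : List (List Int)) (movimiento : String) (nueva_posicion_cabeza : List Int) (out : Bool) : Prop := ¬ D_partida_perdida posicion_serpiente movimiento nueva_posicion_cabeza → out = partida_perdida_alt posicion_serpiente movimiento nueva_posicion_cabeza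
instance (posicion_serpiente : List (List Int)) (movimiento : String) (nueva_posicion_cabeza : List Int) (out : Bool) : Decidable (Spec_partida_perdida posicion_serpiente movimiento nueva_posicion_cabeza out) := by unfold Spec_partida_perdida; infer_instance

def pvDiffWitness_partida_perdida : List (List Int) × String × List Int := ([[34, 40], [33, 40]], "s", [0, 0])
def pvDiffWitnessOut_partida_perdida : Bool × Bool := (false, true)

-- ===== CLAIM (what is proved, stated in full; the proofs are below) =====
def Claim_unchanged_partida_perdida : Prop := ∀ (posicion_serpiente : List (List Int)) (movimiento : String) (nueva_posicion_cabeza : List Int), Dom_partida_perdida posicion_serpiente movimiento nueva_posicion_cabeza → Pre_partida_perdida posicion_serpiente movimiento nueva_posicion_cabeza → Spec_partida_perdida posicion_serpiente movimiento nueva_posicion_cabeza (partida_perdida posicion_serpiente movimiento nueva_posicion_cabeza)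
def Claim_changed_partida_perdida : Prop := Dom_partida_perdida (pvDiffWitness_partida_perdida.1) (pvDiffWitness_partida_perdida.2.1) (pvDiffWitness_partida_perdida.2.2) ∧ Pre_partida_perdida (pvDiffWitness_partida_perdida.1) (pvDiffWitness_partida_perdida.2.1) (pvDiffWitness_partida_perdida.2.2) ∧ D_partida_perdida (pvDiffWitness_partida_perdida.1) (pvDiffWitness_partida_perdida.2.1) (pvDiffWitness_partida_perdida.2.2) ∧ partida_perdida (pvDiffWitness_partida_perdida.1) (pvDiffWitness_partida_perdida.2.1) (pvDiffWitness_partida_perdida.2.2) = pvDiffWitnessOut_partida_perdida.1 ∧ partida_perdida_alt (pvDiffWitness_partida_perdida.1) (pvDiffWitness_partida_perdida.2.1) (pvDiffWitness_partida_perdida.2.2) = pvDiffWitnessOut_partida_perdida.2 ∧ pvDiffWitnessOut_partida_perdida.1 ≠ pvDiffWitnessOut_partida_perdida.2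
def Claim_exact_partida_perdida : Prop := ∀ (posicion_serpiente : List (List Int)) (movimiento : String) (nueva_posicion_cabeza : List Int), Dom_partida_perdida posicion_serpiente movimiento nueva_posicion_cabeza → Pre_partida_perdida posicion_serpiente movimiento nueva_posicion_cabeza → D_partida_perdida posicion_serpiente movimiento nueva_posicion_cabeza → partida_perdida posicion_serpiente movimiento nueva_posicion_cabeza ≠ partida_perdida_alt posicion_serpiente movimiento nueva_posicion_cabeza

-- ===== LEMMAS AND PROOFS =====

-- the self-collision condition both programs test, as a Prop
def SelfColl (ps : List (List Int)) (npc : List Int) : Prop :=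
  (npc ∈ ps.dropLast ∧ 3 ≤ ps.length) ∨ (npc ∈ ps ∧ ps.length = 2)

-- D_'s short self-collision clause equals SelfColl
theorem scoll_iff (ps : List (List Int)) (npc : List Int) :
    (npc ∈ ps.dropLast ∨ (npc ∈ ps ∧ ps.length = 2)) ↔ SelfColl ps npc := by
  unfold SelfColl
  constructor
  · rintro (hm | h)
    · by_cases h2 : ps.length = 2
      · exact Or.inr ⟨List.dropLast_subset ps hm, h2⟩
      · have hl := List.length_dropLast (xs := ps)
        have hpos : 0 < ps.dropLast.length := List.length_pos_of_mem hm
        exact Or.inl ⟨hm, by omega⟩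
    · exact Or.inr h
  · rintro (⟨hm, _⟩ | h)
    · exact Or.inl hm
    · exact Or.inr h

-- A's two self-collision disjuncts equal B's cuerpo membership, as Bools
theorem cuerpo_eq (ps : List (List Int)) (npc : List Int) :
    ((PySem.List.slice ps none (some (-1))).contains npc && decide (ps.length > 2)
      || (ps.contains npc && decide (ps.length = 2)))
    = (if ps.length = 2 then ps else PySem.List.slice ps none (some (-1))).contains npc := by
  rw [PySem.List.slice_to_neg_one]
  by_cases h2 : ps.length = 2
  · simp [h2]
  · simp [h2]
    by_cases h3 : ps.length > 2
    · simp [h3]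
    · simp [h3]
      intro hm
      rcases ps with _ | ⟨x, _ | ⟨y, t⟩⟩ <;> simp_all <;> omega

-- B's cuerpo membership as SelfColl
theorem cuerpo_iff (x : List Int) (t : List (List Int)) (npc : List Int) :
    ((if (x :: t).length = 2 then x :: t
        else PySem.List.slice (x :: t) none (some (-1))).contains npc = true) ↔
      SelfColl (x :: t) npc := by
  match t with
  | [] => simp [SelfColl, PySem.List.slice_to_neg_one]
  | [y] => simp [SelfColl, PySem.List.slice_to_neg_one]
  | y :: z :: u => simp [SelfColl, PySem.List.slice_to_neg_one]

-- a guarded case chain that returns True on a hit is a disjunction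
theorem ifchain (c1 c2 c3 c4 b : Bool) :
    (if c1 = true then true else if c2 = true then true else if c3 = true then true
      else if c4 = true then true else b) = (c1 || c2 || c3 || c4 || b) := by
  by_cases h1 : c1 = true <;> by_cases h2 : c2 = true <;> by_cases h3 : c3 = true <;>
    by_cases h4 : c4 = true <;> simp_all

-- characterisation of port A on a well-formed head
theorem A_char (f c : Int) (t : List (List Int)) (mov : String) (npc : List Int) :
    (partida_perdida (([f, c]) :: t) mov npc = true) ↔
      ((0 ≤ c ∧ c < 70 ∧ f = 0 ∧ mov = "w") ∨
       (0 ≤ c ∧ c < 35 ∧ f = 34 ∧ mov = "s") ∨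
       (0 ≤ f ∧ f < 35 ∧ c = 0 ∧ mov = "a") ∨
       (0 ≤ f ∧ f < 35 ∧ c = 69 ∧ mov = "d") ∨
       SelfColl (([f, c]) :: t) npc) := by
  have hget : PySem.List.pyGet? ((([f, c]) : List Int) :: t) (0 : Int) = some [f, c] := by
    simp [PySem.List.pyGet?, PySem.List.pyIdx?]
  unfold partida_perdida
  rw [hget]
  simp only [PySem.List.slice_to_neg_one, Bool.or_eq_true, Bool.and_eq_true,
    List.contains_eq_mem, decide_eq_true_eq, beq_iff_eq, List.mem_map,
    PySem.List.mem_pyRange_one, List.cons.injEq, and_true, List.length_cons,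
    SelfColl]
  constructor
  · rintro (((((⟨⟨i, hi, hf, hc⟩, hm⟩ | ⟨⟨i, hi, hf, hc⟩, hm⟩) | ⟨⟨i, hi, hf, hc⟩, hm⟩) |
        ⟨⟨i, hi, hf, hc⟩, hm⟩) | ⟨hm, hl⟩) | ⟨hm, hl⟩)
    · exact Or.inl ⟨by omega, by omega, by omega, hm⟩
    · exact Or.inr (Or.inl ⟨by omega, by omega, by omega, hm⟩)
    · exact Or.inr (Or.inr (Or.inl ⟨by omega, by omega, by omega, hm⟩))
    · exact Or.inr (Or.inr (Or.inr (Or.inl ⟨by omega, by omega, by omega, hm⟩)))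
    · exact Or.inr (Or.inr (Or.inr (Or.inr (Or.inl ⟨hm, by simpa using hl⟩))))
    · exact Or.inr (Or.inr (Or.inr (Or.inr (Or.inr ⟨hm, by simpa using hl⟩))))
  · rintro (⟨h1, h2, hf, hm⟩ | ⟨h1, h2, hf, hm⟩ | ⟨h1, h2, hc, hm⟩ | ⟨h1, h2, hc, hm⟩ |
        ⟨hm, hl⟩ | ⟨hm, hl⟩)
    · exact Or.inl (Or.inl (Or.inl (Or.inl (Or.inl ⟨⟨c, ⟨h1, h2⟩, hf.symm, rfl⟩, hm⟩))))
    · exact Or.inl (Or.inl (Or.inl (Or.inl (Or.inr ⟨⟨c, ⟨h1, h2⟩, hf.symm, rfl⟩, hm⟩))))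
    · exact Or.inl (Or.inl (Or.inl (Or.inr ⟨⟨f, ⟨h1, h2⟩, rfl, hc.symm⟩, hm⟩)))
    · exact Or.inl (Or.inl (Or.inr ⟨⟨f, ⟨h1, h2⟩, rfl, hc.symm⟩, hm⟩))
    · exact Or.inl (Or.inr ⟨hm, by simp at hl ⊢; omega⟩)
    · exact Or.inr ⟨hm, by simp at hl ⊢; omega⟩

-- characterisation of port B on a well-formed head
set_option maxHeartbeats 1000000 in
theorem B_char (f c : Int) (t : List (List Int)) (mov : String) (npc : List Int) :
    (partida_perdida_alt (([f, c]) :: t) mov npc = true) ↔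
      ((0 ≤ c ∧ c < 70 ∧ f = 0 ∧ mov = "w") ∨
       (0 ≤ c ∧ c < 70 ∧ f = 34 ∧ mov = "s") ∨
       (0 ≤ f ∧ f < 35 ∧ c = 0 ∧ mov = "a") ∨
       (0 ≤ f ∧ f < 35 ∧ c = 69 ∧ mov = "d") ∨
       SelfColl (([f, c]) :: t) npc) := by
  have hget : PySem.List.pyGet? ((([f, c]) : List Int) :: t) (0 : Int) = some [f, c] := by
    simp [PySem.List.pyGet?, PySem.List.pyIdx?]
  unfold partida_perdida_alt
  rw [hget]
  simp only []
  rw [ifchain]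
  simp only [Bool.or_eq_true, Bool.and_eq_true, decide_eq_true_eq, beq_iff_eq, Int.reduceSub]
  rw [cuerpo_iff]
  tauto

-- D_ restated through SelfColl on a well-formed head
theorem D_char (f c : Int) (t : List (List Int)) (mov : String) (npc : List Int) :
    D_partida_perdida (([f, c]) :: t) mov npc ↔
      (mov = "s" ∧ f = 34 ∧ 35 ≤ c ∧ c < 70 ∧ ¬ SelfColl (([f, c]) :: t) npc) := by
  unfold D_partida_perdida
  rw [scoll_iff]
  simp [pvCol]

theorem partida_perdida_spec : Claim_unchanged_partida_perdida := by
  intro ps mov npc _hdom hpre hnd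
  cases ps with
  | nil => exact absurd rfl hpre
  | cons h t =>
    match h with
    | [f, c] =>
      rw [D_char] at hnd
      rw [Bool.eq_iff_iff, A_char, B_char]
      by_cases hS : SelfColl (([f, c]) :: t) npc
      · constructor <;> intro _ <;> exact Or.inr (Or.inr (Or.inr (Or.inr hS)))
      · constructor
        · rintro (h1 | ⟨a1, a2, hf, hm⟩ | h3 | h4 | hs)
          · exact Or.inl h1
          · exact Or.inr (Or.inl ⟨a1, by omega, hf, hm⟩)
          · exact Or.inr (Or.inr (Or.inl h3))
          · exact Or.inr (Or.inr (Or.inr (Or.inl h4)))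
          · exact Or.inr (Or.inr (Or.inr (Or.inr hs)))
        · rintro (h1 | ⟨a1, a2, hf, hm⟩ | h3 | h4 | hs)
          · exact Or.inl h1
          · refine Or.inr (Or.inl ⟨a1, ?_, hf, hm⟩)
            by_cases hc35 : c < 35
            · exact hc35
            · exact absurd ⟨hm, hf, by omega, a2, hS⟩ hnd
          · exact Or.inr (Or.inr (Or.inl h3))
          · exact Or.inr (Or.inr (Or.inr (Or.inl h4)))
          · exact Or.inr (Or.inr (Or.inr (Or.inr hs)))
    | [] =>
      have hget : PySem.List.pyGet? (([] : List Int) :: t) (0 : Int) = some [] := by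
        simp [PySem.List.pyGet?, PySem.List.pyIdx?]
      unfold partida_perdida partida_perdida_alt
      rw [hget]
      simp only []
      rw [← cuerpo_eq (([] : List Int) :: t) npc]
      simp [List.contains_eq_mem, PySem.List.mem_pyRange_one]
    | [x] =>
      have hget : PySem.List.pyGet? (([x] : List Int) :: t) (0 : Int) = some [x] := by
        simp [PySem.List.pyGet?, PySem.List.pyIdx?]
      unfold partida_perdida partida_perdida_alt
      rw [hget]
      simp only []
      rw [← cuerpo_eq (([x] : List Int) :: t) npc]
      simp [List.contains_eq_mem, PySem.List.mem_pyRange_one]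
    | x :: y :: z :: r =>
      have hget : PySem.List.pyGet? ((x :: y :: z :: r : List Int) :: t) (0 : Int)
          = some (x :: y :: z :: r) := by
        simp [PySem.List.pyGet?, PySem.List.pyIdx?]
      unfold partida_perdida partida_perdida_alt
      rw [hget]
      simp only []
      rw [← cuerpo_eq ((x :: y :: z :: r : List Int) :: t) npc]
      simp [List.contains_eq_mem, PySem.List.mem_pyRange_one]

theorem partida_perdida_changed : Claim_changed_partida_perdida := by
  unfold Claim_changed_partida_perdida; decide

theorem partida_perdida_tight : Claim_exact_partida_perdida := by
  intro ps mov npc _hdom hpre hd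
  cases ps with
  | nil => exact absurd rfl hpre
  | cons h t =>
    have hh : h = [34, pvCol (h :: t)] := by
      have := hd.2.1
      simpa using this
    match h, hh with
    | [f, c], _ =>
      rw [D_char] at hd
      obtain ⟨hm, hf, h35, h70, hS⟩ := hd
      intro hEq
      rw [Bool.eq_iff_iff, A_char, B_char] at hEq
      have hB : (0 ≤ c ∧ c < 70 ∧ f = 34 ∧ mov = "s") := ⟨by omega, h70, hf, hm⟩
      have hA := hEq.mpr (Or.inr (Or.inl hB))
      subst hm
      rcases hA with ⟨_, _, _, hm2⟩ | ⟨_, h2, _, _⟩ | ⟨_, _, _, hm2⟩ | ⟨_, _, _, hm2⟩ | hs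
      · exact absurd hm2 (by decide)
      · omega
      · exact absurd hm2 (by decide)
      · exact absurd hm2 (by decide)
      · exact hS hs
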